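-- pv_equiv track=rewrite | github.com/Guo-xuejian/leetcode-practice | 1229. 安排会议日程.py | minAvailableDuration
-- ===== SOURCE A (Python) =====
-- from typing import List
--
-- def minAvailableDuration(slots1: List[List[int]], slots2: List[List[int]], duration: int) -> List[int]:
--     slots1.sort()
--     slots2.sort()
--     n1, n2 = len(slots1), len(slots2)
--     i = 0
--     j = 0
--     while i < n1 and j < n2:
--         s1, e1 = slots1[i]
--         s2, e2 = slots2[j]
--         s = max(s1, s2)     # 起始时间取较大值
--         e = min(e1, e2)     # 结束时间去较小值
--         if e - s >= duration:   # 时常满足要求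
--             return [s, s + duration]
--         if e1 < e2:     # i 区间先结束
--             i += 1
--         else:           # j 区间先结束
--             j += 1
--     return []
-- ===== SOURCE B (Python) =====
-- def minAvailableDuration(slots1, slots2, duration):
--     # Brute-force over all slot pairs, keeping the smallest valid common start.
--     # Note: unlike A, this does not sort slots1/slots2 in place (return value is the same).
--     best = None
--     for s1, e1 in slots1:
--         for s2, e2 in slots2:
--             s = max(s1, s2)
--             if min(e1, e2) - s >= duration and (best is None or s < best):
--                 best = s
--     return [] if best is None else [best, best + duration]
-- ===== Notes on version B (the rewrite author's own statement) =====
-- stated objective: alternative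
-- what changed: Replaces sort-both-lists plus a two-pointer sweep by a direct brute-force scan over all pairs of slots that keeps the minimal valid common start; no sorting and no pointer advancing logic (A also sorts its arguments in place, B does not mutate them).
-- outside the precondition, e.g. on minAvailableDuration([[0, 10]], [[0, 10], [5]], 1): A returns [0, 1], B raises ValueError
import Mathlib
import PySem

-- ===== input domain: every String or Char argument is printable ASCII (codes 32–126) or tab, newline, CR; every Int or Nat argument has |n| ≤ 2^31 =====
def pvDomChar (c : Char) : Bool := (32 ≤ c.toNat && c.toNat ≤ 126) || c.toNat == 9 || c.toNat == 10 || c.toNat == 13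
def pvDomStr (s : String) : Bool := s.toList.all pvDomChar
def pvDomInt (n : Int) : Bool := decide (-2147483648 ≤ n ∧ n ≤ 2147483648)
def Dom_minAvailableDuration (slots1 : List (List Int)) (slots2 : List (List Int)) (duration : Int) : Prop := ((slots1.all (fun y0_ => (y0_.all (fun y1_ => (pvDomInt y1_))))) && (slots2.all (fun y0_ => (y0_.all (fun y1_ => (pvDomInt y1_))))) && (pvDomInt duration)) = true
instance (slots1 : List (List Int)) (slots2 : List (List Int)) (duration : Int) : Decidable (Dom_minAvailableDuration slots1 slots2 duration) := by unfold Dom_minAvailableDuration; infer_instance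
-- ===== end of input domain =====

-- B replaces A's sort + two-pointer sweep by a brute-force minimum over all slot pairs
-- (alternative algorithm, same return value; Python A sorts both argument lists in place, B does not
-- mutate them — the equivalence proved here is about the return value only).


-- ===== PORT A =====
-- A's while loop, recursing on the same state (i, j); on a slot that is not a 2-element list
-- Python's unpacking `s1, e1 = slots1[i]` raises ValueError — those inputs are outside Pre_
-- (the `| _, _ => []` default is only ever reached outside Pre_).
def aloop (slots1 slots2 : List (List Int)) (n1 n2 : Nat) (duration : Int) (i j : Nat) : List Int :=
  if i < n1 ∧ j < n2 then
    match PySem.List.pyGet? slots1 (Int.ofNat i), PySem.List.pyGet? slots2 (Int.ofNat j) with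
    | some [s1, e1], some [s2, e2] =>
      let s := max s1 s2
      let e := min e1 e2
      if e - s ≥ duration then [s, s + duration]
      else if e1 < e2 then aloop slots1 slots2 n1 n2 duration (i + 1) j
      else aloop slots1 slots2 n1 n2 duration i (j + 1)
    | _, _ => []
  else []
termination_by (n1 - i) + (n2 - j)
decreasing_by all_goals omega

def minAvailableDuration (slots1 : List (List Int)) (slots2 : List (List Int)) (duration : Int) : List Int :=
  -- slots1.sort(); slots2.sort() — Python sorts in place; here the sorted lists are bound locally
  let a := PySem.List.sorted slots1 (fun x => x)
  let b := PySem.List.sorted slots2 (fun x => x)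
  aloop a b a.length b.length duration 0 0

-- ===== PORT B =====
-- brute force over all pairs, keeping the smallest valid common start.
-- (a slot that is not a 2-element list makes Python B raise ValueError; those inputs are outside Pre_.)
def minAvailableDuration_alt (slots1 : List (List Int)) (slots2 : List (List Int)) (duration : Int) : List Int :=
  let best :=
    slots1.foldl (fun best p =>
      match p with
      | [s1, e1] =>
        slots2.foldl (fun best q =>
          match q with
          | [s2, e2] =>
            let s := max s1 s2
            if min e1 e2 - s ≥ duration then
              match best with
              | none => some s
              | some b => if s < b then some s else best
            else best
          | _ => best) best
      | _ => best) (none : Option Int)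
  match best with
  | none => []
  | some b => [b, b + duration]

-- ===== PRECONDITION & SPEC =====
-- Pre_ excludes the inputs on which unpacking `s1, e1 = ...` raises ValueError in A or B: some slot
-- is not a 2-element list (B reads every slot of slots2 as soon as slots1 is nonempty, so Pre_ also
-- excludes a few inputs on which A returns early before reaching a malformed slot that makes B raise).
def Pre_minAvailableDuration (slots1 : List (List Int)) (slots2 : List (List Int)) (duration : Int) : Prop :=
  (∀ p ∈ slots1, p.length = 2) ∧ (slots1 = [] ∨ ∀ q ∈ slots2, q.length = 2)
instance (slots1 : List (List Int)) (slots2 : List (List Int)) (duration : Int) : Decidable (Pre_minAvailableDuration slots1 slots2 duration) := by unfold Pre_minAvailableDuration; infer_instance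

def pvWitness_minAvailableDuration : List (List Int) × List (List Int) × Int :=
  ([[0, 5], [6, 9]], [[1, 4], [7, 9]], 2)

def Spec_minAvailableDuration (slots1 : List (List Int)) (slots2 : List (List Int)) (duration : Int) (out : List Int) : Prop := out = minAvailableDuration_alt slots1 slots2 duration
instance (slots1 : List (List Int)) (slots2 : List (List Int)) (duration : Int) (out : List Int) : Decidable (Spec_minAvailableDuration slots1 slots2 duration out) := by unfold Spec_minAvailableDuration; infer_instance

-- ===== CLAIM (what is proved, stated in full; the proofs are below) =====
def Claim_equal_minAvailableDuration : Prop := ∀ (slots1 : List (List Int)) (slots2 : List (List Int)) (duration : Int), Dom_minAvailableDuration slots1 slots2 duration → Pre_minAvailableDuration slots1 slots2 duration → Spec_minAvailableDuration slots1 slots2 duration (minAvailableDuration slots1 slots2 duration)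

-- ===== LEMMAS AND PROOFS =====

def row (d s1 e1 : Int) (ys : List (List Int)) : List Int :=
  ys.filterMap (fun q => match q with
    | [s2, e2] => if min e1 e2 - max s1 s2 ≥ d then some (max s1 s2) else none
    | _ => none)

def prow (d : Int) : List Int → List (List Int) → List Int
  | [s1, e1], ys => row d s1 e1 ys
  | _, _ => []

def cand (d : Int) (xs ys : List (List Int)) : List Int :=
  xs.flatMap (fun p => prow d p ys)

theorem mem_row {d s1 e1 : Int} {ys : List (List Int)} {m : Int} :
    m ∈ row d s1 e1 ys ↔ ∃ s2 e2, [s2, e2] ∈ ys ∧ min e1 e2 - max s1 s2 ≥ d ∧ m = max s1 s2 := by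
  constructor
  · intro h
    rcases List.mem_filterMap.mp h with ⟨q, hq, hv⟩
    rcases q with _ | ⟨a, _ | ⟨b, _ | ⟨c, t⟩⟩⟩ <;> simp at hv
    rcases hv with ⟨hge, hm⟩
    exact ⟨a, b, hq, hge, hm.symm⟩
  · rintro ⟨s2, e2, hq, hge, rfl⟩
    exact List.mem_filterMap.mpr ⟨[s2, e2], hq, by simp [hge]⟩

theorem mem_cand {d : Int} {xs ys : List (List Int)} {m : Int} :
    m ∈ cand d xs ys ↔ ∃ s1 e1 s2 e2, [s1, e1] ∈ xs ∧ [s2, e2] ∈ ys ∧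
      min e1 e2 - max s1 s2 ≥ d ∧ m = max s1 s2 := by
  constructor
  · intro h
    rcases List.mem_flatMap.mp h with ⟨p, hp, hm⟩
    rcases p with _ | ⟨a, _ | ⟨b, _ | ⟨c, t⟩⟩⟩ <;> simp [prow] at hm
    rcases mem_row.mp hm with ⟨s2, e2, hq, hge, rfl⟩
    exact ⟨a, b, s2, e2, hp, hq, hge, rfl⟩
  · rintro ⟨s1, e1, s2, e2, hp, hq, hge, rfl⟩
    exact List.mem_flatMap.mpr ⟨[s1, e1], hp, by simpa [prow] using mem_row.mpr ⟨s2, e2, hq, hge, rfl⟩⟩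

def upd (best : Option Int) (v : Int) : Option Int :=
  match best with
  | none => some v
  | some b => if v < b then some v else some b

theorem foldl_upd_some_ne_none {l : List Int} {b : Int} :
    l.foldl upd (some b) ≠ none := by
  induction l generalizing b with
  | nil => simp
  | cons a t ih =>
    simp only [List.foldl_cons, upd]
    split <;> exact ih

theorem foldl_upd_none_eq_none {l : List Int} :
    l.foldl upd none = none ↔ l = [] := by
  cases l with
  | nil => simp
  | cons a t =>
    simp only [List.foldl_cons, upd]
    exact ⟨fun h => absurd h foldl_upd_some_ne_none, by simp⟩

theorem foldl_upd_some_spec {l : List Int} {b m : Int}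
    (h : l.foldl upd (some b) = some m) :
    (m = b ∨ m ∈ l) ∧ m ≤ b ∧ ∀ x ∈ l, m ≤ x := by
  induction l generalizing b with
  | nil => simp at h; subst h; simp
  | cons a t ih =>
    simp only [List.foldl_cons, upd] at h
    split at h
    · rcases ih h with ⟨hmem, hle, hall⟩
      refine ⟨?_, ?_, ?_⟩
      · rcases hmem with rfl | hm
        · exact Or.inr (List.mem_cons_self)
        · exact Or.inr (List.mem_cons_of_mem _ hm)
      · omega
      · intro x hx
        rcases List.mem_cons.mp hx with rfl | hx
        · exact hle
        · exact hall x hx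
    · rcases ih h with ⟨hmem, hle, hall⟩
      refine ⟨?_, hle, ?_⟩
      · rcases hmem with rfl | hm
        · exact Or.inl rfl
        · exact Or.inr (List.mem_cons_of_mem _ hm)
      · intro x hx
        rcases List.mem_cons.mp hx with rfl | hx
        · omega
        · exact hall x hx

theorem foldl_upd_none_spec {l : List Int} {m : Int}
    (h : l.foldl upd none = some m) :
    m ∈ l ∧ ∀ x ∈ l, m ≤ x := by
  cases l with
  | nil => simp at h
  | cons a t =>
    simp only [List.foldl_cons, upd] at h
    rcases foldl_upd_some_spec h with ⟨hmem, hle, hall⟩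
    refine ⟨?_, ?_⟩
    · rcases hmem with rfl | hm
      · exact List.mem_cons_self
      · exact List.mem_cons_of_mem _ hm
    · intro x hx
      rcases List.mem_cons.mp hx with rfl | hx
      · exact hle
      · exact hall x hx

theorem inner_eq (d s1 e1 : Int) (ys : List (List Int)) (acc : Option Int) :
    ys.foldl (fun best q =>
          match q with
          | [s2, e2] =>
            let s := max s1 s2
            if min e1 e2 - s ≥ d then
              match best with
              | none => some s
              | some b => if s < b then some s else best
            else best
          | _ => best) acc = (row d s1 e1 ys).foldl upd acc := by
  induction ys generalizing acc with
  | nil => simp [row]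
  | cons q t ih =>
    rcases q with _ | ⟨a, _ | ⟨b, _ | ⟨c, r⟩⟩⟩ <;>
      simp only [List.foldl_cons, row, List.filterMap_cons]
    · exact ih acc
    · exact ih acc
    · split
      · have h2 : (match acc with
            | none => some (max s1 a)
            | some b => if max s1 a < b then some (max s1 a) else acc) = upd acc (max s1 a) := by
          cases acc with
          | none => rfl
          | some b => simp only [upd]
        rw [List.foldl_cons, h2]
        rw [ih]
        rfl
      · rw [ih]
        rfl
    · exact ih acc

theorem alt_eq (slots1 slots2 : List (List Int)) (d : Int) :
    minAvailableDuration_alt slots1 slots2 d =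
      match (cand d slots1 slots2).foldl upd none with
      | none => []
      | some b => [b, b + d] := by
  have outer : ∀ (xs : List (List Int)) (acc : Option Int),
      xs.foldl (fun best p =>
        match p with
        | [s1, e1] =>
          slots2.foldl (fun best q =>
            match q with
            | [s2, e2] =>
              let s := max s1 s2
              if min e1 e2 - s ≥ d then
                match best with
                | none => some s
                | some b => if s < b then some s else best
              else best
            | _ => best) best
        | _ => best) acc = (cand d xs slots2).foldl upd acc := by
    intro xs
    induction xs with
    | nil => intro acc; simp [cand]
    | cons p t ih =>
      intro acc
      rcases p with _ | ⟨a, _ | ⟨b, _ | ⟨c, r⟩⟩⟩ <;>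
        simp only [List.foldl_cons, cand, List.flatMap_cons, List.foldl_append, prow]
      · exact ih acc
      · exact ih acc
      · rw [inner_eq]
        exact ih _
      · exact ih acc
  unfold minAvailableDuration_alt
  rw [outer]

def go (d : Int) : List (List Int) → List (List Int) → List Int
  | x :: xs, y :: ys =>
    match x, y with
    | [s1, e1], [s2, e2] =>
      if min e1 e2 - max s1 s2 ≥ d then [max s1 s2, max s1 s2 + d]
      else if e1 < e2 then go d xs (y :: ys)
      else go d (x :: xs) ys
    | _, _ => []
  | _, _ => []
termination_by xs ys => xs.length + ys.length

theorem le_head {a b c e : Int} (h : ([a, b] : List Int) ≤ [c, e]) : a ≤ c := by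
  rcases le_iff_lt_or_eq.mp h with h | h
  · rw [show (([a, b] : List Int) < [c, e]) = List.Lex (· < ·) [a, b] [c, e] from rfl] at h
    cases h with
    | cons h => exact le_of_eq rfl
    | rel h => exact le_of_lt h
  · injection h with h1 _; exact le_of_eq h1

theorem row_eq_nil {d s1 e1 : Int} {ys : List (List Int)}
    (h : ∀ s2 e2, [s2, e2] ∈ ys → ¬ (min e1 e2 - max s1 s2 ≥ d)) :
    row d s1 e1 ys = [] := by
  rw [row, List.filterMap_eq_nil_iff]
  intro q hq
  rcases q with _ | ⟨a, _ | ⟨b, _ | ⟨c, r⟩⟩⟩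
  · rfl
  · rfl
  · exact if_neg (h a b hq)
  · rfl

theorem cand_cons_left {d : Int} {x : List Int} {xs ys : List (List Int)} :
    cand d (x :: xs) ys = prow d x ys ++ cand d xs ys := by
  simp [cand]

theorem cand_drop_right {d : Int} {xs ys : List (List Int)} {y : List Int}
    (h : ∀ s1 e1, [s1, e1] ∈ xs → ∀ s2 e2, y = [s2, e2] → ¬ (min e1 e2 - max s1 s2 ≥ d)) :
    cand d xs (y :: ys) = cand d xs ys := by
  induction xs with
  | nil => rfl
  | cons p t ih =>
    rw [cand_cons_left, cand_cons_left, ih (fun s1 e1 hm => h s1 e1 (List.mem_cons_of_mem _ hm))]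
    congr 1
    rcases p with _ | ⟨a, _ | ⟨b, _ | ⟨c, r⟩⟩⟩
    · rfl
    · rfl
    · simp only [prow, row, List.filterMap_cons]
      rcases y with _ | ⟨u, _ | ⟨v, _ | ⟨w, r2⟩⟩⟩
      · rfl
      · rfl
      · have hn : (match ([u, v] : List Int) with
            | [s2, e2] => if min b e2 - max a s2 ≥ d then some (max a s2) else none
            | _ => none) = none := if_neg (h a b List.mem_cons_self u v rfl)
        rw [hn]
      · rfl
    · rfl

theorem cand_nil_right {d : Int} {xs : List (List Int)} : cand d xs [] = [] := by
  induction xs with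
  | nil => rfl
  | cons p t ih =>
    rw [cand_cons_left, ih, List.append_nil]
    rcases p with _ | ⟨a, _ | ⟨b, _ | ⟨c, r⟩⟩⟩ <;> rfl

theorem go_spec (d : Int) (xs ys : List (List Int)) :
    List.Pairwise (· ≤ ·) xs → List.Pairwise (· ≤ ·) ys →
    (∀ p ∈ xs, p.length = 2) → (∀ q ∈ ys, q.length = 2) →
    (go d xs ys = [] ∧ ∀ m, m ∉ cand d xs ys) ∨
    (∃ s, go d xs ys = [s, s + d] ∧ s ∈ cand d xs ys ∧ ∀ m ∈ cand d xs ys, s ≤ m) := by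
  induction xs, ys using go.induct d with
  | case1 xs ys s1 e1 s2 e2 hv =>
    intro hx hy hx2 hy2
    refine Or.inr ⟨max s1 s2, ?_, ?_, ?_⟩
    · rw [go, if_pos hv]
    · exact mem_cand.mpr ⟨s1, e1, s2, e2, List.mem_cons_self, List.mem_cons_self, hv, rfl⟩
    · intro m hm
      rcases mem_cand.mp hm with ⟨a, b, u, v, hp, hq, _, rfl⟩
      have h1 : s1 ≤ a := by
        rcases List.mem_cons.mp hp with he | ht
        · injection he with h1 h2; omega
        · exact le_head ((List.pairwise_cons.mp hx).1 _ ht)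
      have h2 : s2 ≤ u := by
        rcases List.mem_cons.mp hq with he | ht
        · injection he with h1 h2; omega
        · exact le_head ((List.pairwise_cons.mp hy).1 _ ht)
      omega
  | case2 xs ys s1 e1 s2 e2 hv hlt ih =>
    intro hx hy hx2 hy2
    have hrow : prow d [s1, e1] ([s2, e2] :: ys) = [] := by
      rw [show prow d [s1, e1] ([s2, e2] :: ys) = row d s1 e1 ([s2, e2] :: ys) from rfl]
      apply row_eq_nil
      intro u v huv hge
      rcases List.mem_cons.mp huv with he | ht
      · injection he with h1 h2; injection h2 with h2 _; subst h1; subst h2; exact hv hge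
      · have : s2 ≤ u := le_head ((List.pairwise_cons.mp hy).1 _ ht)
        have hmin : min e1 v ≤ e1 := min_le_left _ _
        have : min e1 e2 = e1 := min_eq_left (le_of_lt hlt)
        have : max s1 s2 ≤ max s1 u := by omega
        exact hv (by omega)
    have hc : cand d ([s1, e1] :: xs) ([s2, e2] :: ys) = cand d xs ([s2, e2] :: ys) := by
      rw [cand_cons_left, hrow, List.nil_append]
    have hgo : go d ([s1, e1] :: xs) ([s2, e2] :: ys) = go d xs ([s2, e2] :: ys) := by
      rw [go, if_neg hv, if_pos hlt]
    rw [hgo, hc]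
    exact ih (List.pairwise_cons.mp hx).2 hy (fun p hp => hx2 p (List.mem_cons_of_mem _ hp)) hy2
  | case3 xs ys s1 e1 s2 e2 hv hlt ih =>
    intro hx hy hx2 hy2
    have hle : e2 ≤ e1 := by omega
    have hc : cand d ([s1, e1] :: xs) ([s2, e2] :: ys) = cand d ([s1, e1] :: xs) ys := by
      apply cand_drop_right
      intro a b hab u v huv hge
      injection huv with h1 h2; injection h2 with h2 _; subst h1; subst h2
      have : s1 ≤ a := by
        rcases List.mem_cons.mp hab with he | ht
        · injection he with h1 h2; omega
        · exact le_head ((List.pairwise_cons.mp hx).1 _ ht)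
      have hmin : min b e2 ≤ e2 := min_le_right _ _
      have : min e1 e2 = e2 := min_eq_right hle
      have : max s1 s2 ≤ max a s2 := by omega
      exact hv (by omega)
    have hgo : go d ([s1, e1] :: xs) ([s2, e2] :: ys) = go d ([s1, e1] :: xs) ys := by
      rw [go, if_neg hv, if_neg hlt]
    rw [hgo, hc]
    exact ih hx (List.pairwise_cons.mp hy).2 hx2 (fun q hq => hy2 q (List.mem_cons_of_mem _ hq))
  | case4 x xs y ys hm =>
    intro hx hy hx2 hy2
    exfalso
    have h1 := hx2 x List.mem_cons_self
    have h2 := hy2 y List.mem_cons_self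
    rcases x with _ | ⟨a, _ | ⟨b, _ | ⟨c, r⟩⟩⟩ <;> simp at h1
    rcases y with _ | ⟨u, _ | ⟨v, _ | ⟨w, r2⟩⟩⟩ <;> simp at h2
    exact hm a b u v rfl rfl
  | case5 xs ys hm =>
    intro hx hy hx2 hy2
    left
    cases xs with
    | nil => exact ⟨by rw [go] <;> intros <;> simp_all, by simp [cand]⟩
    | cons p t =>
      cases ys with
      | nil =>
        refine ⟨by rw [go] <;> intros <;> simp_all, ?_⟩
        rw [cand_nil_right]
        simp
      | cons q r => exact absurd (hm p t q r rfl rfl) (fun h => h)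

theorem go_nil_left {d : Int} {ys : List (List Int)} : go d [] ys = [] := by
  rw [go] <;> intros <;> simp_all

theorem go_nil_right {d : Int} {xs : List (List Int)} : go d xs [] = [] := by
  cases xs with
  | nil => exact go_nil_left
  | cons p t => rw [go] <;> intros <;> simp_all

theorem aloop_eq_go (d : Int) (xs ys : List (List Int)) :
    ∀ (k i j : Nat), (xs.length - i) + (ys.length - j) ≤ k →
      aloop xs ys xs.length ys.length d i j = go d (xs.drop i) (ys.drop j) := by
  intro k
  induction k with
  | zero =>
    intro i j hk
    have hi : xs.length ≤ i := by omega
    rw [aloop, if_neg (by omega), List.drop_eq_nil_of_le hi, go_nil_left]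
  | succ k ih =>
    intro i j hk
    by_cases h : i < xs.length ∧ j < ys.length
    · rw [aloop, if_pos h]
      have hgx : PySem.List.pyGet? xs (Int.ofNat i) = some xs[i] := by
        rw [show Int.ofNat i = ((i : Nat) : Int) from rfl, PySem.List.pyGet?_natCast,
          List.getElem?_eq_getElem h.1]
      have hgy : PySem.List.pyGet? ys (Int.ofNat j) = some ys[j] := by
        rw [show Int.ofNat j = ((j : Nat) : Int) from rfl, PySem.List.pyGet?_natCast,
          List.getElem?_eq_getElem h.2]
      rw [hgx, hgy, ← List.getElem_cons_drop h.1, ← List.getElem_cons_drop h.2]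
      rcases hx : xs[i] with _ | ⟨a, _ | ⟨b, _ | ⟨c, r⟩⟩⟩ <;>
        rcases hy : ys[j] with _ | ⟨u, _ | ⟨v, _ | ⟨w, r2⟩⟩⟩ <;>
          simp only [go]
      -- the [a,b] / [u,v] case
      show (if min b v - max a u ≥ d then _ else _) = _
      split
      · rfl
      · split
        · rw [ih (i + 1) j (by omega), ← List.getElem_cons_drop h.2, hy]
        · rw [ih i (j + 1) (by omega), ← List.getElem_cons_drop h.1, hx]
    · rw [aloop, if_neg h]
      rcases not_and_or.mp h with hi | hj
      · rw [List.drop_eq_nil_of_le (by omega), go_nil_left]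
      · have hj2 : ys.length ≤ j := by omega
        rw [List.drop_eq_nil_of_le hj2, go_nil_right]

theorem sorted_inst_eq (xs : List (List Int)) :
    (@PySem.List.sorted (List Int) (List Int) List.instLT (fun a b => a.decidableLT b) xs (fun x => x) false)
  = (@PySem.List.sorted (List Int) (List Int) List.instLinearOrder.toLT LinearOrder.toDecidableLT xs (fun x => x) false) := by
  congr 1

theorem main_eq (slots1 slots2 : List (List Int)) (d : Int)
    (h1 : ∀ p ∈ slots1, p.length = 2) (h2 : slots1 = [] ∨ ∀ q ∈ slots2, q.length = 2) :
    minAvailableDuration slots1 slots2 d = minAvailableDuration_alt slots1 slots2 d := by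
  show aloop _ _ _ _ _ 0 0 = _
  rw [aloop_eq_go d _ _ ((PySem.List.sorted slots1 (fun x => x)).length
        + (PySem.List.sorted slots2 (fun x => x)).length) 0 0 (by omega),
    List.drop_zero, List.drop_zero]
  rcases h2 with rfl | h2
  · have hnil : PySem.List.sorted ([] : List (List Int)) (fun x => x) = [] := by
      rw [PySem.List.sorted_eq_nil_iff]
    rw [hnil, go_nil_left]
    simp [minAvailableDuration_alt]
  · have hxp : List.Pairwise (· ≤ ·) (PySem.List.sorted slots1 (fun x => x)) := by
      rw [sorted_inst_eq]
      exact PySem.List.sorted_pairwise slots1 (fun x => x)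
    have hyp : List.Pairwise (· ≤ ·) (PySem.List.sorted slots2 (fun x => x)) := by
      rw [sorted_inst_eq]
      exact PySem.List.sorted_pairwise slots2 (fun x => x)
    have hx2 : ∀ p ∈ PySem.List.sorted slots1 (fun x => x), p.length = 2 :=
      fun p hp => h1 p ((PySem.List.mem_sorted _ _ _ _).mp hp)
    have hy2 : ∀ q ∈ PySem.List.sorted slots2 (fun x => x), q.length = 2 :=
      fun q hq => h2 q ((PySem.List.mem_sorted _ _ _ _).mp hq)
    have hmemA : ∀ m : Int, m ∈ cand d (PySem.List.sorted slots1 (fun x => x)) (PySem.List.sorted slots2 (fun x => x)) ↔ m ∈ cand d slots1 slots2 := by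
      intro m
      rw [mem_cand, mem_cand]
      constructor
      · rintro ⟨s1, e1, s2, e2, hp, hq, hv, rfl⟩
        exact ⟨s1, e1, s2, e2, (PySem.List.mem_sorted _ _ _ _).mp hp, (PySem.List.mem_sorted _ _ _ _).mp hq, hv, rfl⟩
      · rintro ⟨s1, e1, s2, e2, hp, hq, hv, rfl⟩
        exact ⟨s1, e1, s2, e2, (PySem.List.mem_sorted _ _ _ _).mpr hp, (PySem.List.mem_sorted _ _ _ _).mpr hq, hv, rfl⟩
    rw [alt_eq]
    rcases go_spec d _ _ hxp hyp hx2 hy2 with ⟨hgo, hnom⟩ | ⟨s, hgo, hmem, hmin⟩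
    · rw [hgo]
      have hcand : cand d slots1 slots2 = [] := by
        apply List.eq_nil_iff_forall_not_mem.mpr
        intro m hm
        exact hnom m ((hmemA m).mpr hm)
      rw [hcand]
      rfl
    · rw [hgo]
      have hs : s ∈ cand d slots1 slots2 := (hmemA s).mp hmem
      rcases hfold : (cand d slots1 slots2).foldl upd none with _ | m
      · exfalso
        rw [foldl_upd_none_eq_none] at hfold
        rw [hfold] at hs
        simp at hs
      · rcases foldl_upd_none_spec hfold with ⟨hmmem, hmall⟩
        have h3 : s ≤ m := hmin m ((hmemA m).mpr hmmem)
        have h4 : m ≤ s := hmall s hs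
        have : m = s := le_antisymm h4 h3
        rw [this]

-- ===== VERDICT (by name: the statement is the Claim_ definition above) =====
theorem minAvailableDuration_spec : Claim_equal_minAvailableDuration := by
  intro slots1 slots2 duration _ hpre
  show minAvailableDuration slots1 slots2 duration = minAvailableDuration_alt slots1 slots2 duration
  exact main_eq slots1 slots2 duration hpre.1 hpre.2
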